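-- pv_equiv track=rewrite | github.com/Naperality/CompetitionPython | ACCENTURE/MaxExponents.py | maxExponents
-- ===== SOURCE A (Python) =====
-- def exponent_of_2(n):
--     count = 0
--     while n % 2 == 0:
--         count += 1
--         n //= 2
--     return count
--
-- def maxExponents(a, b):
--     max_num = a
--     max_exp = exponent_of_2(a)
--
--     for i in range(a + 1, b + 1):
--         current_exp = exponent_of_2(i)
--         if current_exp > max_exp:
--             max_exp , max_num= current_exp, i
--         elif current_exp == max_exp and i < max_num:
--             max_num = i
--
--     return max_num
-- ===== SOURCE B (Python) =====
-- def maxExponents(a, b):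
--     # Halving recursion: the smallest number in [a, b] with the maximal
--     # power-of-2 factor is 2 * (the answer for the halved interval).
--     if a >= b:
--         return a
--     return 2 * maxExponents(-(-a // 2), b // 2)
-- ===== Notes on version B (the rewrite author's own statement) =====
-- stated objective: faster
-- what changed: Replaced the linear scan of [a,b] (computing the 2-adic valuation of every element) by a halving recursion: the answer for [a,b] is 2 times the answer for [ceil(a/2), floor(b/2)], since the smallest maximal-power-of-2 element of a multi-element interval is even; Pre_ excludes a=0 and intervals with a<=0<=b, on which A's exponent_of_2 loops forever.
import Mathlib
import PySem

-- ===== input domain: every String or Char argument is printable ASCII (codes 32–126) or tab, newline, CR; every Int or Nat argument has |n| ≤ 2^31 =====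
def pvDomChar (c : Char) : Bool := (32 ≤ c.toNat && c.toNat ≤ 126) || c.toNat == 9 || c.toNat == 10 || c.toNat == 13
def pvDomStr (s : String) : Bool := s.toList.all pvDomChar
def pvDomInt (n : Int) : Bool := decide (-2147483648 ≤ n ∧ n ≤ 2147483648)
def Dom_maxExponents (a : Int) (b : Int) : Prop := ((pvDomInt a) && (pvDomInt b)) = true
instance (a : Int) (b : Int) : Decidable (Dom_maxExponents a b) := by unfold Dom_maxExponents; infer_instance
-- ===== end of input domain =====

-- B replaces A's linear scan of [a,b] by a halving recursion (answer = 2 * answer of the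
-- halved interval); equivalence is proved on Pre_, which excludes exactly the inputs on
-- which A's exponent_of_2 loops forever.

-- ===== PORT A =====
-- termination measure lemma for exLoop (cited by name in decreasing_by)
theorem exLoop_dec (n : Int) (h : n ≠ 0 ∧ PySem.Int.mod n 2 = 0) :
    (PySem.Int.floordiv n 2).natAbs < n.natAbs := by
  have h2 := PySem.Int.floordiv_mul_add_mod n 2
  rw [h.2, add_zero] at h2
  have hq : PySem.Int.floordiv n 2 ≠ 0 := by
    intro h0
    rw [h0, zero_mul] at h2
    exact h.1 h2.symm
  have h3 : ((PySem.Int.floordiv n 2) * 2).natAbs = (PySem.Int.floordiv n 2).natAbs * 2 := by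
    rw [Int.natAbs_mul]
    simp
  conv_rhs => rw [← h2]
  rw [h3]
  exact (lt_mul_iff_one_lt_right (Int.natAbs_pos.mpr hq)).mpr one_lt_two

-- exponent_of_2's while loop; the `n ≠ 0` conjunct is a totality guard only
-- (Python loops forever on n = 0; Pre_ excludes exactly those inputs).
def exLoop (count : Int) (n : Int) : Int :=
  if h : n ≠ 0 ∧ PySem.Int.mod n 2 = 0 then
    exLoop (count + 1) (PySem.Int.floordiv n 2)
  else count
termination_by n.natAbs
decreasing_by exact exLoop_dec n h

def exponentOf2 (n : Int) : Int := exLoop 0 n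

-- the loop body: state (max_num, max_exp)
def aStep (s : Int × Int) (i : Int) : Int × Int :=
  let current_exp := exponentOf2 i
  if current_exp > s.2 then (i, current_exp)
  else if current_exp = s.2 ∧ i < s.1 then (i, s.2) else s

def maxExponents (a : Int) (b : Int) : Int :=
  ((PySem.List.pyRange (a + 1) (b + 1) 1).foldl aStep (a, exponentOf2 a)).1

-- ===== PORT B =====
-- termination measure lemma for maxExponents_alt (cited by name in decreasing_by)
theorem alt_dec (a b : Int) (h : ¬ a ≥ b) :
    (PySem.Int.floordiv b 2 - -(PySem.Int.floordiv (-a) 2)).toNat < (b - a).toNat := by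
  have h1 : PySem.Int.floordiv (-a) 2 * 2 ≤ -a := by
    calc PySem.Int.floordiv (-a) 2 * 2
        ≤ PySem.Int.floordiv (-a) 2 * 2 + PySem.Int.mod (-a) 2 :=
          le_add_of_nonneg_right (PySem.Int.mod_nonneg (-a) (b := 2) two_pos)
      _ = -a := PySem.Int.floordiv_mul_add_mod (-a) 2
  have h2 : PySem.Int.floordiv b 2 * 2 ≤ b := by
    calc PySem.Int.floordiv b 2 * 2
        ≤ PySem.Int.floordiv b 2 * 2 + PySem.Int.mod b 2 :=
          le_add_of_nonneg_right (PySem.Int.mod_nonneg b (b := 2) two_pos)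
      _ = b := PySem.Int.floordiv_mul_add_mod b 2
  have hba : (0 : Int) < b - a := sub_pos.mpr (lt_of_not_ge h)
  have hs : PySem.Int.floordiv b 2 - -(PySem.Int.floordiv (-a) 2)
      = PySem.Int.floordiv b 2 + PySem.Int.floordiv (-a) 2 := by ring
  rw [hs]
  have hsum2 : (PySem.Int.floordiv b 2 + PySem.Int.floordiv (-a) 2) * 2 ≤ b - a := by
    calc (PySem.Int.floordiv b 2 + PySem.Int.floordiv (-a) 2) * 2
        = PySem.Int.floordiv b 2 * 2 + PySem.Int.floordiv (-a) 2 * 2 := by ring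
      _ ≤ b + -a := add_le_add h2 h1
      _ = b - a := by ring
  have hlt : PySem.Int.floordiv b 2 + PySem.Int.floordiv (-a) 2 < b - a := by
    by_cases hc : PySem.Int.floordiv b 2 + PySem.Int.floordiv (-a) 2 ≤ 0
    · exact lt_of_le_of_lt hc hba
    · exact lt_of_lt_of_le
        ((lt_mul_iff_one_lt_right (lt_of_not_ge hc)).mpr one_lt_two) hsum2
  exact (Int.toNat_lt_toNat hba).mpr hlt

def maxExponents_alt (a : Int) (b : Int) : Int :=
  if a ≥ b then a
  else 2 * maxExponents_alt (-(PySem.Int.floordiv (-a) 2)) (PySem.Int.floordiv b 2)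
termination_by (b - a).toNat
decreasing_by exact alt_dec a b (by assumption)

-- ===== PRECONDITION & SPEC =====
-- Pre_ excludes exactly the inputs on which A never returns: exponent_of_2 loops forever
-- on 0, which A reaches iff a = 0 or a ≤ 0 ≤ b.
def Pre_maxExponents (a : Int) (b : Int) : Prop := 0 < a ∨ (a < 0 ∧ b < 0)
instance (a : Int) (b : Int) : Decidable (Pre_maxExponents a b) := by unfold Pre_maxExponents; infer_instance
def pvWitness_maxExponents : Int × Int := (3, 10)

def Spec_maxExponents (a : Int) (b : Int) (out : Int) : Prop := out = maxExponents_alt a b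
instance (a : Int) (b : Int) (out : Int) : Decidable (Spec_maxExponents a b out) := by unfold Spec_maxExponents; infer_instance

-- ===== CLAIM (what is proved, stated in full; the proofs are below) =====
def Claim_equal_maxExponents : Prop := ∀ (a : Int) (b : Int), Dom_maxExponents a b → Pre_maxExponents a b → Spec_maxExponents a b (maxExponents a b)

-- ===== LEMMAS AND PROOFS =====

-- `Good a b r`: r lies in [a,b] and is the least element of maximal 2-adic valuation.
def Good (a b r : Int) : Prop :=
  a ≤ r ∧ r ≤ b ∧ ∀ i, a ≤ i → i ≤ b →
    (exponentOf2 i < exponentOf2 r ∨ (exponentOf2 i = exponentOf2 r ∧ r ≤ i))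

theorem good_unique {a b r1 r2 : Int} (h1 : Good a b r1) (h2 : Good a b r2) : r1 = r2 := by
  obtain ⟨ha1, hb1, hm1⟩ := h1
  obtain ⟨ha2, hb2, hm2⟩ := h2
  have c1 := hm1 r2 ha2 hb2
  have c2 := hm2 r1 ha1 hb1
  omega

theorem exLoop_aux : ∀ (k : Nat) (n : Int), n.natAbs ≤ k →
    (∀ c, exLoop c n = c + exLoop 0 n) ∧ 0 ≤ exLoop 0 n := by
  intro k
  induction k with
  | zero =>
    intro n hn
    have hn0 : n = 0 := by omega
    subst hn0
    constructor
    · intro c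
      rw [exLoop, dif_neg (by simp), exLoop, dif_neg (by simp)]
      omega
    · rw [exLoop, dif_neg (by simp)]
  | succ k ih =>
    intro n hn
    by_cases hg : n ≠ 0 ∧ PySem.Int.mod n 2 = 0
    · have hdvd : (2 : Int) ∣ n := (PySem.Int.mod_eq_zero_iff_dvd n 2).1 hg.2
      have hfm := PySem.Int.floordiv_mul_add_mod n 2
      have hlt : (PySem.Int.floordiv n 2).natAbs ≤ k := by omega
      have ih' := ih _ hlt
      constructor
      · intro c
        rw [exLoop, dif_pos hg]
        conv_rhs => rw [exLoop, dif_pos hg]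
        rw [ih'.1 (c + 1), ih'.1 (0 + 1)]
        ring
      · rw [exLoop, dif_pos hg, ih'.1 (0 + 1)]
        have := ih'.2
        omega
    · constructor
      · intro c; rw [exLoop, dif_neg hg]; conv_rhs => rw [exLoop, dif_neg hg]
        simp
      · rw [exLoop, dif_neg hg]

theorem exLoop_shift (n c : Int) : exLoop c n = c + exLoop 0 n :=
  ((exLoop_aux n.natAbs n le_rfl).1 c)

theorem exponentOf2_nonneg (n : Int) : 0 ≤ exponentOf2 n :=
  (exLoop_aux n.natAbs n le_rfl).2

theorem exponentOf2_odd {n : Int} (h : ¬ (2 : Int) ∣ n) : exponentOf2 n = 0 := by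
  have hm : ¬ PySem.Int.mod n 2 = 0 := fun hc => h ((PySem.Int.mod_eq_zero_iff_dvd n 2).1 hc)
  rw [exponentOf2, exLoop, dif_neg (by tauto)]

theorem exponentOf2_double {n : Int} (h : n ≠ 0) :
    exponentOf2 (2 * n) = exponentOf2 n + 1 := by
  have hdvd : (2 : Int) ∣ 2 * n := ⟨n, rfl⟩
  have hm : PySem.Int.mod (2 * n) 2 = 0 := (PySem.Int.mod_eq_zero_iff_dvd _ 2).2 hdvd
  have hfd : PySem.Int.floordiv (2 * n) 2 = n := by
    have := PySem.Int.floordiv_mul_add_mod (2 * n) 2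
    omega
  show exLoop 0 (2 * n) = exLoop 0 n + 1
  rw [exLoop, dif_pos ⟨by omega, hm⟩, hfd, exLoop_shift]
  omega

theorem aStep_good {a b : Int} {s : Int × Int} (hse : s.2 = exponentOf2 s.1)
    (hg : Good a (b - 1) s.1) :
    (aStep s b).2 = exponentOf2 (aStep s b).1 ∧ Good a b (aStep s b).1 := by
  obtain ⟨hga, hgb, hgm⟩ := hg
  simp only [aStep]
  by_cases h1 : exponentOf2 b > s.2
  · rw [if_pos h1]
    dsimp only
    refine ⟨rfl, by omega, le_rfl, ?_⟩
    intro i hi1 hi2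
    by_cases hib : i = b
    · subst hib; right; exact ⟨rfl, le_rfl⟩
    · have := hgm i hi1 (by omega)
      left; omega
  · rw [if_neg h1]
    have hns : ¬ (exponentOf2 b = s.2 ∧ b < s.1) := by omega
    rw [if_neg hns]
    refine ⟨hse, hga, by omega, ?_⟩
    intro i hi1 hi2
    by_cases hib : i = b
    · subst hib
      omega
    · exact hgm i hi1 (by omega)

theorem A_inv (a : Int) : ∀ (k : Nat) (b : Int), b - a = (k : Int) →
    (((PySem.List.pyRange (a + 1) (b + 1) 1).foldl aStep (a, exponentOf2 a)).2
      = exponentOf2 ((PySem.List.pyRange (a + 1) (b + 1) 1).foldl aStep (a, exponentOf2 a)).1)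
    ∧ Good a b ((PySem.List.pyRange (a + 1) (b + 1) 1).foldl aStep (a, exponentOf2 a)).1 := by
  intro k
  induction k with
  | zero =>
    intro b hb
    have hba : b = a := by omega
    subst hba
    have hemp : PySem.List.pyRange (b + 1) (b + 1) 1 = [] := by
      rw [PySem.List.pyRange_one]; simp
    rw [hemp]
    refine ⟨rfl, le_rfl, le_rfl, ?_⟩
    intro i h1 h2
    have : i = b := by omega
    subst this
    right; exact ⟨rfl, le_rfl⟩
  | succ k ih =>
    intro b hb
    have hab : a + 1 ≤ b := by omega
    have hsplit : PySem.List.pyRange (a + 1) (b + 1) 1 =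
        PySem.List.pyRange (a + 1) b 1 ++ [b] := PySem.List.pyRange_one_succ_right hab
    have hb' : (b - 1) - a = (k : Int) := by omega
    have ihb := ih (b - 1) hb'
    have hrw : PySem.List.pyRange (a + 1) ((b - 1) + 1) 1 = PySem.List.pyRange (a + 1) b 1 := by
      norm_num
    rw [hrw] at ihb
    rw [hsplit, List.foldl_append, List.foldl_cons, List.foldl_nil]
    exact aStep_good ihb.1 ihb.2

theorem A_good {a b : Int} (hab : a ≤ b) : Good a b (maxExponents a b) := by
  have := A_inv a (b - a).toNat b (by omega)
  exact this.2

theorem B_good : ∀ (k : Nat) (a b : Int), b - a ≤ (k : Int) → a ≤ b → (0 < a ∨ b < 0) →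
    Good a b (maxExponents_alt a b) := by
  intro k
  induction k with
  | zero =>
    intro a b hk hab h0
    have : a = b := by omega
    subst this
    rw [maxExponents_alt, if_pos le_rfl]
    refine ⟨le_rfl, le_rfl, ?_⟩
    intro i h1 h2
    have : i = a := by omega
    subst this
    right; exact ⟨rfl, le_rfl⟩
  | succ k ih =>
    intro a b hk hab h0
    by_cases heq : a = b
    · subst heq
      rw [maxExponents_alt, if_pos le_rfl]
      refine ⟨le_rfl, le_rfl, ?_⟩
      intro i h1 h2
      have : i = a := by omega
      subst this
      right; exact ⟨rfl, le_rfl⟩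
    · have hlt : a < b := by omega
      rw [maxExponents_alt, if_neg (by omega)]
      set a' := -(PySem.Int.floordiv (-a) 2) with ha'
      set b' := PySem.Int.floordiv b 2 with hb'
      have hq1 := PySem.Int.floordiv_mul_add_mod (-a) 2
      have hm1 := PySem.Int.mod_nonneg (-a) (b := 2) (by omega)
      have hm2 := PySem.Int.mod_lt (-a) (b := 2) (by omega)
      have hq2 := PySem.Int.floordiv_mul_add_mod b 2
      have hm3 := PySem.Int.mod_nonneg b (b := 2) (by omega)
      have hm4 := PySem.Int.mod_lt b (b := 2) (by omega)
      -- ceiling / floor bracketing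
      have hca : a ≤ 2 * a' ∧ 2 * a' ≤ a + 1 := by omega
      have hcb : 2 * b' ≤ b ∧ b ≤ 2 * b' + 1 := by omega
      have hab' : a' ≤ b' := by omega
      have h0' : 0 < a' ∨ b' < 0 := by omega
      have hk' : b' - a' ≤ (k : Int) := by omega
      obtain ⟨hra, hrb, hrm⟩ := ih a' b' hk' (by omega) h0'
      set r' := maxExponents_alt a' b' with hr'
      have hr0 : r' ≠ 0 := by omega
      have hEd := exponentOf2_double hr0
      have hEnn := exponentOf2_nonneg r'
      refine ⟨by omega, by omega, ?_⟩
      intro i hi1 hi2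
      rcases Int.even_or_odd i with ⟨j, hj⟩ | ⟨j, hj⟩
      · -- i = 2 * j even
        have hj2 : i = 2 * j := by omega
        have hj0 : j ≠ 0 := by omega
        have hja : a' ≤ j := by omega
        have hjb : j ≤ b' := by omega
        have hEj := exponentOf2_double hj0
        have := hrm j hja hjb
        rw [hj2, hEj, hEd]
        omega
      · -- i odd
        have hodd : ¬ (2 : Int) ∣ i := by
          rintro ⟨m, hm'⟩; omega
        have := exponentOf2_odd hodd
        rw [hEd]
        omega

-- ===== VERDICT (by name: the statement is the Claim_ definition above) =====
theorem maxExponents_spec : Claim_equal_maxExponents := by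
  intro a b _ hpre
  unfold Spec_maxExponents
  by_cases hab : a ≤ b
  · exact good_unique (A_good hab)
      (B_good (b - a).toNat a b (by omega) hab (by unfold Pre_maxExponents at hpre; omega))
  · have hemp : PySem.List.pyRange (a + 1) (b + 1) 1 = [] := by
      rw [PySem.List.pyRange_one]
      have : (b + 1 - (a + 1)).toNat = 0 := by omega
      rw [this]; simp
    rw [maxExponents_alt, if_pos (by omega)]
    unfold maxExponents
    rw [hemp]
    rfl
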